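-- pv_equiv track=rewrite | github.com/mamg22/advent-of-code-2023 | aoc/day01.py | replace_number_text
-- ===== SOURCE A (Python) =====
-- def replace_number_text(line: str):
--     REPLACEMENTS = {
--         'zero': '0ero',
--         'one': '1ne',
--         'two': '2wo',
--         'three': '3hree',
--         'four': '4our',
--         'five': '5ive',
--         'six': '6ix',
--         'seven': '7even',
--         'eight': '8ight',
--         'nine': '9ine',
--     }
--
--     while True:
--         indexes = {}
--         for text in REPLACEMENTS:
--             idx = line.find(text)
--             if idx != -1:
--                 indexes[text] = idx
--
--         if len(indexes) > 0:
--             target = min(indexes.items(), key=lambda item: item[1])[0]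
--             line = line.replace(target, REPLACEMENTS[target], 1)
--         else:
--             break
--
--     return line
-- ===== SOURCE B (Python) =====
-- def replace_number_text(line: str):
--     # Single left-to-right pass: A only ever swaps the first letter of the
--     # earliest number word for its digit, so the result is just the original
--     # string with each word-start character replaced by the word's digit.
--     WORDS = {
--         'zero': '0', 'one': '1', 'two': '2', 'three': '3', 'four': '4',
--         'five': '5', 'six': '6', 'seven': '7', 'eight': '8', 'nine': '9',
--     }
--     out = []
--     for i, ch in enumerate(line):
--         for word, digit in WORDS.items():
--             if line.startswith(word, i):
--                 out.append(digit)
--                 break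
--         else:
--             out.append(ch)
--     return ''.join(out)
-- ===== Notes on version B (the rewrite author's own statement) =====
-- stated objective: simpler
-- what changed: A repeatedly rescans the whole string (find every word, pick the min index, replace, restart the while loop); B makes a single left-to-right pass, emitting the word's digit wherever a number word starts and the original character otherwise.
import Mathlib
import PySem

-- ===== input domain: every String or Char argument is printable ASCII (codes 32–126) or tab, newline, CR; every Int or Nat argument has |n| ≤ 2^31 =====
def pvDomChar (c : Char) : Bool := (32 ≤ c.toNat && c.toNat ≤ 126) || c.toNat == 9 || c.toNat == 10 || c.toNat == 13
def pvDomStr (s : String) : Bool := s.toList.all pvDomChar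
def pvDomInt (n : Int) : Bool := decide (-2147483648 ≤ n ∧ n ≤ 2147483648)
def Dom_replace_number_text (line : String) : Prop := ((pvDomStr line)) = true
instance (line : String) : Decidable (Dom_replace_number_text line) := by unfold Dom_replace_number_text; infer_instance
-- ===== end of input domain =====

-- B builds the output in one left-to-right pass (replacing each number-word's first
-- letter by its digit in place) instead of A's repeated full-string rescans; objective: simpler.


-- ===== PORT A =====
-- A's REPLACEMENTS dict, in insertion order; the value is carried with its key so the
-- later lookup REPLACEMENTS[target] is the second component of the chosen pair.
def pvWordsA : List (List Char × List Char) :=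
  [("zero".toList, "0ero".toList), ("one".toList, "1ne".toList), ("two".toList, "2wo".toList),
   ("three".toList, "3hree".toList), ("four".toList, "4our".toList), ("five".toList, "5ive".toList),
   ("six".toList, "6ix".toList), ("seven".toList, "7even".toList), ("eight".toList, "8ight".toList),
   ("nine".toList, "9ine".toList)]

-- hand port of Python's line.replace(old, new, 1): exact for nonempty old (all of A's
-- targets are nonempty) — replaces the first occurrence of old, scanning left to right.
def pvReplace1 (old new : List Char) : List Char → List Char
  | [] => []
  | c :: rest =>
    if PySem.Chars.startswith (c :: rest) old then new ++ (c :: rest).drop old.length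
    else c :: pvReplace1 old new rest

-- the 'indexes' dict of one loop round: entries ((text, repl), idx) for words that occur
def pvIndexes (s : List Char) : List ((List Char × List Char) × Int) :=
  pvWordsA.filterMap (fun wr =>
    let idx := PySem.Chars.find s wr.1
    if idx = -1 then none else some (wr, idx))

-- termination measure: each replacement turns one letter into a digit
def pvLetters (s : List Char) : Nat := s.countP (·.isAlpha)

lemma pvWordsA_letters : ∀ wr ∈ pvWordsA, wr.1 ≠ [] ∧ pvLetters wr.2 < pvLetters wr.1 := by
  decide

lemma pvReplace1_letters_lt (w r : List Char) (hlt : pvLetters r < pvLetters w) :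
    ∀ s : List Char, w <:+: s → pvLetters (pvReplace1 w r s) < pvLetters s := by
  intro s
  induction s with
  | nil =>
    intro h
    have hw : w = [] := List.eq_nil_of_infix_nil h
    subst hw; simp [pvLetters] at hlt
  | cons c rest ih =>
    intro h
    by_cases hsw : PySem.Chars.startswith (c :: rest) w = true
    · have hpre : w <+: c :: rest := (PySem.Chars.startswith_iff _ _).mp hsw
      obtain ⟨q, hq⟩ := hpre
      rw [pvReplace1, if_pos hsw]
      have hdrop : (c :: rest).drop w.length = q := by
        rw [← hq]; simp
      rw [hdrop, ← hq]
      simp only [pvLetters] at hlt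
      simp only [pvLetters, List.countP_append]
      omega
    · rw [pvReplace1, if_neg hsw]
      rcases (List.infix_cons_iff).mp h with hpre | hinf
      · exact absurd ((PySem.Chars.startswith_iff _ _).mpr hpre) hsw
      · have := ih hinf
        simp only [pvLetters, List.countP_cons] at *
        omega

lemma pvIndexes_letters_lt {s : List Char} {wr : List Char × List Char} {idx : Int}
    (h : (wr, idx) ∈ pvIndexes s) : pvLetters (pvReplace1 wr.1 wr.2 s) < pvLetters s := by
  simp only [pvIndexes, List.mem_filterMap] at h
  obtain ⟨wr', hmem, heq⟩ := h
  by_cases hf : PySem.Chars.find s wr'.1 = -1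
  · simp [hf] at heq
  · rw [if_neg hf] at heq
    have h2 := Prod.ext_iff.mp (Option.some.inj heq)
    simp only at h2
    rw [← h2.1]
    have hinf : wr'.1 <:+: s := (PySem.Chars.find_ne_neg_one_iff _ _).mp hf
    obtain ⟨hne, hlt⟩ := pvWordsA_letters wr' hmem
    exact pvReplace1_letters_lt wr'.1 wr'.2 hlt s hinf

-- the while loop of A: find every word's first index, replace the leftmost one, repeat
def pvLoopA (s : List Char) : List Char :=
  let indexes := pvIndexes s
  match hmin : PySem.List.min? indexes (fun it => it.2) with
  | some (wr, _) => pvLoopA (pvReplace1 wr.1 wr.2 s)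
  | none => s
termination_by pvLetters s
decreasing_by
  exact pvIndexes_letters_lt (PySem.List.min?_mem hmin)

def replace_number_text (line : String) : String := String.mk (pvLoopA line.toList)

-- ===== PORT B =====
def pvWordsB : List (List Char × Char) :=
  [("zero".toList, '0'), ("one".toList, '1'), ("two".toList, '2'), ("three".toList, '3'),
   ("four".toList, '4'), ("five".toList, '5'), ("six".toList, '6'), ("seven".toList, '7'),
   ("eight".toList, '8'), ("nine".toList, '9')]

-- the inner for/else of B: first word starting at this suffix, if any, gives its digit
def pvMatchDigit (t : List Char) : Option Char :=
  (pvWordsB.find? (fun wd => PySem.Chars.startswith t wd.1)).map (·.2)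

-- the enumerate loop of B, as structural recursion over the suffixes of the line
def pvAltGo : List Char → List Char
  | [] => []
  | c :: rest =>
    (match pvMatchDigit (c :: rest) with
     | some d => d
     | none => c) :: pvAltGo rest

def replace_number_text_alt (line : String) : String := String.mk (pvAltGo line.toList)

-- ===== PRECONDITION & SPEC =====
def Spec_replace_number_text (line : String) (out : String) : Prop := out = replace_number_text_alt line
instance (line : String) (out : String) : Decidable (Spec_replace_number_text line out) := by unfold Spec_replace_number_text; infer_instance

-- ===== CLAIM (what is proved, stated in full; the proofs are below) =====
def Claim_equal_replace_number_text : Prop := ∀ (line : String), Dom_replace_number_text line → Spec_replace_number_text line (replace_number_text line)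

-- ===== LEMMAS AND PROOFS =====

lemma pvWordsA_eq_map : pvWordsA = pvWordsB.map (fun wd => (wd.1, wd.2 :: wd.1.drop 1)) := by
  decide

lemma pvWordsB_shape : ∀ wd ∈ pvWordsB, wd.1 ≠ [] ∧ wd.1.all (·.isAlpha) ∧ wd.2.isAlpha = false := by
  decide

lemma pvWordsB_prefix_free : ∀ a ∈ pvWordsB, ∀ b ∈ pvWordsB, a.1 <+: b.1 → a = b := by
  decide

-- generic: find? returns the unique matching element
lemma pv_find?_unique {α : Type} (p : α → Bool) (l : List α) (a : α) (ha : a ∈ l)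
    (hpa : p a = true) (huniq : ∀ b ∈ l, p b = true → b = a) : l.find? p = some a := by
  induction l with
  | nil => cases ha
  | cons x xs ih =>
    by_cases hx : p x = true
    · have : x = a := huniq x (List.mem_cons_self) hx
      subst this; rw [List.find?_cons_of_pos hx]
    · rw [List.find?_cons_of_neg hx]
      rcases List.mem_cons.mp ha with rfl | ha
      · exact absurd hpa hx
      · exact ih ha (fun b hb => huniq b (List.mem_cons_of_mem _ hb))

-- a suffix starting with a non-letter matches no word
lemma pvMatchDigit_none_head {y : Char} (t : List Char) (hy : y.isAlpha = false) :
    pvMatchDigit (y :: t) = none := by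
  simp only [pvMatchDigit, Option.map_eq_none_iff, List.find?_eq_none]
  intro wd hwd hsw
  have hpre : wd.1 <+: y :: t := (PySem.Chars.startswith_iff _ _).mp hsw
  obtain ⟨hne, hall, _⟩ := pvWordsB_shape wd hwd
  have h0 : 0 < wd.1.length := List.length_pos_iff.mpr hne
  have := hpre.getElem h0
  simp at this
  have := (List.all_eq_true.mp hall) wd.1[0] (List.getElem_mem h0)
  rw [‹wd.1[0] = y›] at this
  simp [hy] at this

-- no match at the head survives changing the char just past u to another non-letter
lemma pvMatchDigit_none_swap {u t : List Char} {x y : Char}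
    (h : pvMatchDigit (u ++ x :: t) = none) (hy : y.isAlpha = false) :
    pvMatchDigit (u ++ y :: t) = none := by
  simp only [pvMatchDigit, Option.map_eq_none_iff, List.find?_eq_none] at h ⊢
  intro wd hwd hsw
  have hpre : wd.1 <+: u ++ y :: t := (PySem.Chars.startswith_iff _ _).mp hsw
  by_cases hlen : wd.1.length ≤ u.length
  · -- the word lies inside u, so it also matched before the swap
    have hpre' : wd.1 <+: u := by
      have := List.prefix_iff_eq_take.mp hpre
      rw [List.take_append_of_le_length hlen] at this
      exact List.prefix_iff_eq_take.mpr this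
    exact h wd hwd ((PySem.Chars.startswith_iff _ _).mpr (hpre'.trans (List.prefix_append _ _)))
  · -- the word covers position u.length, whose char y is not a letter
    push_neg at hlen
    have hget := hpre.getElem hlen
    rw [List.getElem_append_right (le_refl u.length)] at hget
    simp only [Nat.sub_self, List.getElem_cons_zero] at hget
    obtain ⟨_, hall, _⟩ := pvWordsB_shape wd hwd
    simpa [hget, hy] using (List.all_eq_true.mp hall) wd.1[u.length] (List.getElem_mem hlen)

-- core invariance: swapping the matched word's first letter for its digit does not
-- change B's single-pass output
lemma pvAltGo_swap : ∀ (p : List Char) (x y : Char) (t : List Char),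
    (∀ k < p.length, pvMatchDigit ((p ++ x :: t).drop k) = none) →
    pvMatchDigit (x :: t) = some y → y.isAlpha = false →
    pvAltGo (p ++ x :: t) = pvAltGo (p ++ y :: t) := by
  intro p
  induction p with
  | nil =>
    intro x y t _ hhead hy
    simp only [List.nil_append, pvAltGo, hhead, pvMatchDigit_none_head t hy]
  | cons a p ih =>
    intro x y t hnom hhead hy
    have h0 : pvMatchDigit (a :: (p ++ x :: t)) = none := by
      have := hnom 0 (by simp)
      simpa using this
    have h0' : pvMatchDigit (a :: (p ++ y :: t)) = none := by
      have := pvMatchDigit_none_swap (u := a :: p) (t := t) (x := x) h0 hy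
      simpa using this
    simp only [List.cons_append, pvAltGo, h0, h0']
    refine congrArg (List.cons a) (ih x y t ?_ hhead hy)
    intro k hk
    have := hnom (k + 1) (by simp; omega)
    simpa using this

-- if no word occurs at all, B returns the line unchanged
lemma pvAltGo_id : ∀ s : List Char, (∀ wd ∈ pvWordsB, ¬ wd.1 <:+: s) → pvAltGo s = s := by
  intro s
  induction s with
  | nil => intro _; rfl
  | cons c rest ih =>
    intro h
    have hnone : pvMatchDigit (c :: rest) = none := by
      simp only [pvMatchDigit, Option.map_eq_none_iff, List.find?_eq_none]
      intro wd hwd hsw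
      exact h wd hwd ((PySem.Chars.startswith_iff _ _).mp hsw).isInfix
    simp only [pvAltGo, hnone]
    refine congrArg (List.cons c) (ih ?_)
    intro wd hwd hinf
    exact h wd hwd (hinf.trans (List.suffix_cons c rest).isInfix)

-- pvReplace1 rewrites the first occurrence, located by its index
lemma pvReplace1_spec (w r : List Char) (hw : w ≠ []) :
    ∀ (s : List Char) (j : Nat), w <+: s.drop j → (∀ k < j, ¬ w <+: s.drop k) →
    pvReplace1 w r s = s.take j ++ r ++ s.drop (j + w.length) := by
  intro s
  induction s with
  | nil =>
    intro j hpre _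
    simp at hpre
    exact absurd hpre hw
  | cons c rest ih =>
    intro j hpre hmin
    cases j with
    | zero =>
      have hsw : PySem.Chars.startswith (c :: rest) w = true :=
        (PySem.Chars.startswith_iff _ _).mpr (by simpa using hpre)
      rw [pvReplace1, if_pos hsw]
      simp
    | succ j =>
      have hsw : PySem.Chars.startswith (c :: rest) w = false := by
        rw [← Bool.not_eq_true, PySem.Chars.startswith_iff]
        exact hmin 0 (by omega)
      rw [pvReplace1, if_neg (by simp [hsw])]
      have := ih j (by simpa using hpre) (fun k hk => by
        have := hmin (k + 1) (by omega)
        simpa using this)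
      rw [this]
      simp [List.drop_succ_cons, Nat.add_right_comm]

-- membership in the indexes dict
lemma pvIndexes_mem {s : List Char} {wr : List Char × List Char} {idx : Int} :
    (wr, idx) ∈ pvIndexes s ↔ wr ∈ pvWordsA ∧ PySem.Chars.find s wr.1 = idx ∧ idx ≠ -1 := by
  simp only [pvIndexes, List.mem_filterMap]
  constructor
  · rintro ⟨wr', hmem, heq⟩
    by_cases hf : PySem.Chars.find s wr'.1 = -1
    · simp [hf] at heq
    · rw [if_neg hf] at heq
      obtain ⟨h1, h2⟩ := Prod.ext_iff.mp (Option.some.inj heq)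
      simp only at h1 h2
      rw [← h1, ← h2]
      exact ⟨hmem, rfl, hf⟩
  · rintro ⟨hmem, rfl, hne⟩
    exact ⟨wr, hmem, by simp [hne]⟩

-- A's one loop round, decomposed: the min-index word w occurs first at index j, the
-- round replaces exactly its first letter, and B's output is unchanged by the round
lemma pvRound {s : List Char} {wr : List Char × List Char} {idx : Int}
    (hmin : PySem.List.min? (pvIndexes s) (fun it => it.2) = some (wr, idx)) :
    pvAltGo (pvReplace1 wr.1 wr.2 s) = pvAltGo s := by
  have hmem := PySem.List.min?_mem hmin
  have hisMin := PySem.List.min?_isMin hmin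
  obtain ⟨hA, hfind, hne⟩ := pvIndexes_mem.mp hmem
  -- identify wr with its pvWordsB entry
  rw [pvWordsA_eq_map] at hA
  obtain ⟨wd, hwdB, hwd⟩ := List.mem_map.mp hA
  obtain ⟨hwne, _hall, hdig⟩ := pvWordsB_shape wd hwdB
  have hw1 : wr.1 = wd.1 := by rw [← hwd]
  have hw2 : wr.2 = wd.2 :: wd.1.drop 1 := by rw [← hwd]
  have h0le : 0 ≤ PySem.Chars.find s wr.1 := by
    have := PySem.Chars.neg_one_le_find s wr.1
    omega
  obtain ⟨hpre, hfirst⟩ := PySem.Chars.find_spec h0le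
  set j : Nat := (PySem.Chars.find s wr.1).toNat with hj
  have hjlen : j ≤ s.length := by
    have := PySem.Chars.find_le_length s wr.1
    omega
  -- the word starts with a letter x; write s around position j
  obtain ⟨x, w', hxw⟩ : ∃ x w', wd.1 = x :: w' := by
    cases hcase : wd.1 with
    | nil => exact absurd hcase hwne
    | cons x w' => exact ⟨x, w', rfl⟩
  have hsdecomp : s.drop j = x :: (wd.1.drop 1 ++ s.drop (j + wr.1.length)) := by
    obtain ⟨q, hq⟩ := hpre
    have hq' : s.drop (j + wr.1.length) = q := by
      rw [← List.drop_drop, ← hq]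
      simp
    rw [← hq, hq', hw1, hxw]
    simp
  -- the replacement
  have hrepl : pvReplace1 wr.1 wr.2 s =
      s.take j ++ (wd.2 :: (wd.1.drop 1 ++ s.drop (j + wr.1.length))) := by
    rw [pvReplace1_spec wr.1 wr.2 (hw1 ▸ hwne) s j hpre hfirst, hw2]
    simp
  -- no word matches strictly before j
  have hnom : ∀ k < j, pvMatchDigit (s.drop k) = none := by
    intro k hk
    simp only [pvMatchDigit, Option.map_eq_none_iff, List.find?_eq_none]
    intro wd' hwd'B hsw
    have hpre' : wd'.1 <+: s.drop k := (PySem.Chars.startswith_iff _ _).mp hsw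
    have hinf' : wd'.1 <:+: s := hpre'.isInfix.trans (List.drop_suffix k s).isInfix
    have hfind' : 0 ≤ PySem.Chars.find s wd'.1 := (PySem.Chars.find_nonneg_iff s wd'.1).mpr hinf'
    have hle : (PySem.Chars.find s wd'.1).toNat ≤ k := by
      by_contra hgt
      exact (PySem.Chars.find_spec hfind').2 k (by omega) hpre'
    -- wd' contributes an entry to indexes, so idx ≤ its find
    have hmemB : (wd'.1, wd'.2 :: wd'.1.drop 1) ∈ pvWordsA := by
      rw [pvWordsA_eq_map]; exact List.mem_map.mpr ⟨wd', hwd'B, rfl⟩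
    have hentry : ((wd'.1, wd'.2 :: wd'.1.drop 1), PySem.Chars.find s wd'.1) ∈ pvIndexes s :=
      pvIndexes_mem.mpr ⟨hmemB, rfl, by omega⟩
    have hij := hisMin _ hentry
    simp only at hij
    omega
  -- at j, the (unique) match is wd
  have hhead : pvMatchDigit (s.drop j) = some wd.2 := by
    have hswj : PySem.Chars.startswith (s.drop j) wd.1 = true :=
      (PySem.Chars.startswith_iff _ _).mpr (hw1 ▸ hpre)
    have huniq : ∀ b ∈ pvWordsB, PySem.Chars.startswith (s.drop j) b.1 = true → b = wd := by
      intro b hbB hbsw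
      have hbpre : b.1 <+: s.drop j := (PySem.Chars.startswith_iff _ _).mp hbsw
      rcases List.prefix_or_prefix_of_prefix hbpre (hw1 ▸ hpre) with h | h
      · exact pvWordsB_prefix_free b hbB wd hwdB h
      · exact (pvWordsB_prefix_free wd hwdB b hbB h).symm
    rw [pvMatchDigit, pv_find?_unique _ _ wd hwdB hswj huniq]
    rfl
  -- assemble via the swap lemma
  have hs_eq : s = s.take j ++ (x :: (wd.1.drop 1 ++ s.drop (j + wr.1.length))) := by
    conv_lhs => rw [← List.take_append_drop j s]
    rw [hsdecomp]
  rw [hrepl]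
  rw [hsdecomp] at hhead
  refine (pvAltGo_swap (s.take j) x wd.2 (wd.1.drop 1 ++ s.drop (j + wr.1.length)) ?_ hhead hdig).symm.trans ?_
  · intro k hk
    rw [← hs_eq]
    exact hnom k (by rw [List.length_take] at hk; omega)
  · rw [← hs_eq]

lemma pv_main_aux : ∀ (n : Nat) (s : List Char), pvLetters s ≤ n → pvLoopA s = pvAltGo s := by
  intro n
  induction n with
  | zero =>
    intro s hs
    rw [pvLoopA]
    cases hmin : PySem.List.min? (pvIndexes s) (fun it => it.2) with
    | none =>
      show s = pvAltGo s
      refine (pvAltGo_id s ?_).symm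
      intro wd hwdB hinf
      have hfind : PySem.Chars.find s wd.1 ≠ -1 := (PySem.Chars.find_ne_neg_one_iff s wd.1).mpr hinf
      have hmemB : (wd.1, wd.2 :: wd.1.drop 1) ∈ pvWordsA := by
        rw [pvWordsA_eq_map]; exact List.mem_map.mpr ⟨wd, hwdB, rfl⟩
      have hentry := pvIndexes_mem.mpr ⟨hmemB, rfl, hfind⟩
      rw [(PySem.List.min?_eq_none_iff _ _).mp hmin] at hentry
      cases hentry
    | some m =>
      obtain ⟨wr, idx⟩ := m
      have := pvIndexes_letters_lt (PySem.List.min?_mem hmin)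
      omega
  | succ n ih =>
    intro s hs
    rw [pvLoopA]
    cases hmin : PySem.List.min? (pvIndexes s) (fun it => it.2) with
    | none =>
      show s = pvAltGo s
      refine (pvAltGo_id s ?_).symm
      intro wd hwdB hinf
      have hfind : PySem.Chars.find s wd.1 ≠ -1 := (PySem.Chars.find_ne_neg_one_iff s wd.1).mpr hinf
      have hmemB : (wd.1, wd.2 :: wd.1.drop 1) ∈ pvWordsA := by
        rw [pvWordsA_eq_map]; exact List.mem_map.mpr ⟨wd, hwdB, rfl⟩
      have hentry := pvIndexes_mem.mpr ⟨hmemB, rfl, hfind⟩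
      rw [(PySem.List.min?_eq_none_iff _ _).mp hmin] at hentry
      cases hentry
    | some m =>
      obtain ⟨wr, idx⟩ := m
      have hlt := pvIndexes_letters_lt (PySem.List.min?_mem hmin)
      show pvLoopA (pvReplace1 wr.1 wr.2 s) = pvAltGo s
      rw [ih (pvReplace1 wr.1 wr.2 s) (by omega)]
      exact pvRound hmin

lemma pv_main (s : List Char) : pvLoopA s = pvAltGo s :=
  pv_main_aux (pvLetters s) s le_rfl

-- ===== VERDICT (by name: the statement is the Claim_ definition above) =====
theorem replace_number_text_spec : Claim_equal_replace_number_text := by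
  intro line _
  unfold Spec_replace_number_text replace_number_text replace_number_text_alt
  rw [pv_main]
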